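-- pv_equiv track=rewrite | github.com/yiyingyang/Facebook | ZigzagPrint.py | zigzagPrint
-- ===== SOURCE A (Python) =====
-- def zigzagPrint(arr):
--
--     # edge cases
--     if not arr: return ''
--     if len(arr) == 1: return ','.join(map(str,arr[0][::-1]))
--     m = len(arr); n = len(arr[0])
--     ans = []
--
--     # j - i = n-1 ~ 1-m
--     for x in range(1 - m, n)[::-1]:
--         for i in range(m):
--             for j in range(n)[::-1]:
--                 if j == x + i:
--                     ans.append(arr[i][j])
--     return ','.join(map(str, ans))
-- ===== SOURCE B (Python) =====
-- def zigzagPrint(arr):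
--     if not arr:
--         return ''
--     m, n = len(arr), len(arr[0])
--     out = []
--     for x in range(n - 1, -m, -1):
--         for i in range(max(0, -x), min(m - 1, n - 1 - x) + 1):
--             out.append(arr[i][x + i])
--     return ','.join(map(str, out))
-- ===== Notes on version B (the rewrite author's own statement) =====
-- stated objective: faster
-- what changed: Replaces A's inner scans (for each diagonal x, a full i-loop and a full reversed j-loop testing j == x+i) by directly computing the valid i-interval per diagonal and indexing arr[i][x+i], removing both inner scans and the separate single-row special case.
import Mathlib
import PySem

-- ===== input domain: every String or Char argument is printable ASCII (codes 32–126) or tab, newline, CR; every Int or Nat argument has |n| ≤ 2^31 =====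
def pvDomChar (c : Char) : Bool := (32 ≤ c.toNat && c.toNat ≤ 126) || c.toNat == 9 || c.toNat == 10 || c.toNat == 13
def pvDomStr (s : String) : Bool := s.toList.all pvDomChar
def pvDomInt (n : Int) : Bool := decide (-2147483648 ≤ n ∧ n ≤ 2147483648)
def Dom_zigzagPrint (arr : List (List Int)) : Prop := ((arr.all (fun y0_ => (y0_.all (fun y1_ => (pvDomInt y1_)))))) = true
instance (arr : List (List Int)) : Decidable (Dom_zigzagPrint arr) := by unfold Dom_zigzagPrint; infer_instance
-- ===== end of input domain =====

-- B removes A's per-diagonal inner scans by computing the valid row interval of each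
-- anti-diagonal directly and indexing arr[i][x+i]; measured asymptotically faster.


-- ===== PORT A =====
def zigzagPrint (arr : List (List Int)) : String :=
  if arr = [] then "" else
  if arr.length = 1 then
    PySem.Str.join "," ((((PySem.List.slice? (arr.headD []) none none (-1)).getD []).map PySem.Int.toStr))
  else
    PySem.Str.join ","
      ((((PySem.List.pyRange (1 - (arr.length : Int)) (((arr.headD []).length : Int)) 1).reverse).foldl
          (fun ans x =>
            (PySem.List.pyRange 0 ((arr.length : Int)) 1).foldl (fun ans i =>
              ((PySem.List.pyRange 0 (((arr.headD []).length : Int)) 1).reverse).foldl (fun ans j =>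
                if j = x + i then ans ++ [PySem.List.pyGetD (PySem.List.pyGetD arr i []) j 0] else ans)
                ans) ans)
          []).map PySem.Int.toStr)

-- ===== PORT B =====
def zigzagPrint_alt (arr : List (List Int)) : String :=
  if arr = [] then "" else
  PySem.Str.join ","
    (((PySem.List.pyRange (((arr.headD []).length : Int) - 1) (-(arr.length : Int)) (-1)).foldl
        (fun out x =>
          (PySem.List.pyRange (max 0 (-x))
              (min ((arr.length : Int) - 1) (((arr.headD []).length : Int) - 1 - x) + 1) 1).foldl
            (fun out i => out ++ [PySem.List.pyGetD (PySem.List.pyGetD arr i []) (x + i) 0]) out)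
        []).map PySem.Int.toStr)

-- ===== PRECONDITION & SPEC =====
-- Pre_ excludes exactly the ragged inputs where Python A raises IndexError (with 2 or more
-- rows, some row shorter than the first); B raises the same IndexError there.
def Pre_zigzagPrint (arr : List (List Int)) : Prop :=
  arr.length ≤ 1 ∨ ∀ row ∈ arr, (arr.headD []).length ≤ row.length
instance (arr : List (List Int)) : Decidable (Pre_zigzagPrint arr) := by
  unfold Pre_zigzagPrint; infer_instance
def pvWitness_zigzagPrint : List (List Int) := [[1, 2, 3], [4, 5, 6]]

def Spec_zigzagPrint (arr : List (List Int)) (out : String) : Prop := out = zigzagPrint_alt arr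
instance (arr : List (List Int)) (out : String) : Decidable (Spec_zigzagPrint arr out) := by unfold Spec_zigzagPrint; infer_instance

-- ===== CLAIM (what is proved, stated in full; the proofs are below) =====
def Claim_equal_zigzagPrint : Prop := ∀ (arr : List (List Int)), Dom_zigzagPrint arr → Pre_zigzagPrint arr → Spec_zigzagPrint arr (zigzagPrint arr)

-- ===== LEMMAS AND PROOFS =====

-- filter of a nodup list by equality with a constant
theorem filter_eq_const_of_nodup {l : List Int} (h : l.Nodup) (c : Int) :
    l.filter (fun j => decide (j = c)) = if c ∈ l then [c] else [] := by
  induction l with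
  | nil => simp
  | cons a t ih =>
    simp only [List.nodup_cons] at h
    simp only [List.filter_cons, List.mem_cons]
    by_cases hac : a = c
    · subst hac
      have ht : List.filter (fun j => decide (j = a)) t = [] :=
        List.filter_eq_nil_iff.mpr (fun b hb => by
          simp only [decide_eq_true_eq]
          intro hba; exact h.1 (hba ▸ hb))
      simp [ht, h.1]
    · simp only [decide_eq_true_eq, hac, if_false, ih h.2]
      by_cases hc : c ∈ t <;> simp [hc, Ne.symm hac]

-- interval-filter of an increasing integer range is the clipped range
theorem filter_interval_pyRange (b lo hi : Int) : ∀ (a : Int),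
    (PySem.List.pyRange a b 1).filter (fun i => decide (lo ≤ i ∧ i < hi)) =
      PySem.List.pyRange (max a lo) (min b hi) 1 := by
  suffices h : ∀ (k : Nat) (a : Int), (b - a).toNat = k →
      (PySem.List.pyRange a b 1).filter (fun i => decide (lo ≤ i ∧ i < hi)) =
        PySem.List.pyRange (max a lo) (min b hi) 1 from fun a => h _ a rfl
  intro k
  induction k with
  | zero =>
    intro a hk
    rw [PySem.List.pyRange_one_eq_nil (by omega), PySem.List.pyRange_one_eq_nil (by omega)]
    rfl
  | succ k ih =>
    intro a hk
    rw [PySem.List.pyRange_one_cons (show a < b by omega), List.filter_cons,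
      ih (a + 1) (by omega)]
    by_cases hc : lo ≤ a ∧ a < hi
    · rw [if_pos (by simpa using hc),
        show max a lo = a by omega, show max (a + 1) lo = a + 1 by omega,
        PySem.List.pyRange_one_cons (show a < min b hi by omega)]
    · rw [if_neg (by simpa using hc)]
      by_cases hlo : a < lo
      · rw [show max (a + 1) lo = max a lo by omega]
      · rw [PySem.List.pyRange_one_eq_nil (show min b hi ≤ max (a + 1) lo by omega),
          PySem.List.pyRange_one_eq_nil (show min b hi ≤ max a lo by omega)]

-- flatMap of optional singletons is map-after-filter
theorem flatMap_ite_singleton {α : Type} (p : Int → Prop) [DecidablePred p] (f : Int → α) :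
    ∀ (l : List Int), l.flatMap (fun i => if p i then [f i] else []) =
      (l.filter (fun i => decide (p i))).map f := by
  intro l
  induction l with
  | nil => rfl
  | cons a t ih =>
    simp only [List.flatMap_cons, List.filter_cons]
    by_cases hp : p a <;> simp [hp, ih]

-- per-diagonal: A's double inner scan equals B's direct interval traversal
theorem perDiag (arr : List (List Int)) (m n : Int) : ∀ (x : Int) (ans : List Int),
    (PySem.List.pyRange 0 m 1).foldl (fun ans i =>
        ((PySem.List.pyRange 0 n 1).reverse).foldl (fun ans j =>
          if j = x + i then ans ++ [PySem.List.pyGetD (PySem.List.pyGetD arr i []) j 0] else ans)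
          ans) ans
      = (PySem.List.pyRange (max 0 (-x)) (min (m - 1) (n - 1 - x) + 1) 1).foldl (fun out i =>
          out ++ [PySem.List.pyGetD (PySem.List.pyGetD arr i []) (x + i) 0]) ans := by
  intro x ans
  have hf : ∀ (acc : List Int) (i : Int),
      ((PySem.List.pyRange 0 n 1).reverse).foldl (fun ans j =>
          if j = x + i then ans ++ [PySem.List.pyGetD (PySem.List.pyGetD arr i []) j 0] else ans)
          acc
        = acc ++ (if 0 ≤ x + i ∧ x + i < n
            then [PySem.List.pyGetD (PySem.List.pyGetD arr i []) (x + i) 0] else []) := by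
    intro acc i
    rw [PySem.List.foldl_append_ite (fun j => j = x + i)
      (fun j => PySem.List.pyGetD (PySem.List.pyGetD arr i []) j 0),
      List.filter_reverse, filter_eq_const_of_nodup (PySem.List.nodup_pyRange_one 0 n) (x + i)]
    by_cases hmem : x + i ∈ PySem.List.pyRange 0 n 1
    · have h2 := PySem.List.mem_pyRange_one.mp hmem
      rw [if_pos hmem, if_pos h2]; rfl
    · rw [if_neg hmem, if_neg (fun h2 => hmem (PySem.List.mem_pyRange_one.mpr h2))]; rfl
  simp only [hf]
  rw [PySem.List.foldl_append_eq_flatMap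
    (fun i => if 0 ≤ x + i ∧ x + i < n
      then [PySem.List.pyGetD (PySem.List.pyGetD arr i []) (x + i) 0] else []),
    flatMap_ite_singleton (fun i => 0 ≤ x + i ∧ x + i < n)
      (fun i => PySem.List.pyGetD (PySem.List.pyGetD arr i []) (x + i) 0),
    List.filter_congr (l := PySem.List.pyRange 0 m 1)
      (q := fun i => decide (-x ≤ i ∧ i < n - x))
      (fun i _ => by simp only [decide_eq_decide]; omega),
    filter_interval_pyRange m (-x) (n - x) 0,
    show min m (n - x) = min (m - 1) (n - 1 - x) + 1 by omega,
    PySem.List.foldl_append_singleton_eq_map]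

-- B's outer countdown list is A's reversed diagonal list
theorem outer_list_eq (m n : Int) :
    PySem.List.pyRange (n - 1) (-m) (-1) = (PySem.List.pyRange (1 - m) n 1).reverse := by
  rw [PySem.List.pyRange_neg_one_eq_reverse, show -m + 1 = 1 - m from by ring,
    show n - 1 + 1 = n from by ring]

theorem flatMap_congr_mem {α β : Type} {l : List α} {f g : α → List β}
    (h : ∀ x ∈ l, f x = g x) : l.flatMap f = l.flatMap g := by
  induction l with
  | nil => rfl
  | cons a t ih =>
    simp only [List.flatMap_cons, h a (List.mem_cons_self), ih (fun x hx => h x (List.mem_cons_of_mem a hx))]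

theorem flatMap_singleton_eq_map {α β : Type} (f : α → β) (l : List α) :
    l.flatMap (fun x => [f x]) = l.map f := by
  induction l with
  | nil => rfl
  | cons a t ih => simp only [List.flatMap_cons, List.map_cons, ih]; rfl

-- ===== VERDICT (by name: the statement is the Claim_ definition above) =====
theorem zigzagPrint_spec : Claim_equal_zigzagPrint := by
  intro arr _ _
  unfold Spec_zigzagPrint zigzagPrint zigzagPrint_alt
  by_cases hnil : arr = []
  · simp [hnil]
  rw [if_neg hnil, if_neg hnil]
  by_cases h1 : arr.length = 1
  · obtain ⟨row, rfl⟩ := List.length_eq_one_iff.mp h1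
    rw [if_pos h1]
    simp only [List.headD_cons, List.length_cons, List.length_nil, Nat.zero_add, Nat.cast_one]
    rw [PySem.List.slice?_none_none_neg_one, Option.getD_some]
    congr 1
    rw [outer_list_eq 1 (row.length : Int),
      show (1 : Int) - 1 = 0 from by ring]
    simp only [PySem.List.foldl_append_singleton_eq_map]
    rw [PySem.List.foldl_append_eq_flatMap
      (fun x => (PySem.List.pyRange (max 0 (-x)) (min (0:Int) ((row.length : Int) - 1 - x) + 1) 1).map
        (fun i => PySem.List.pyGetD (PySem.List.pyGetD [row] i []) (x + i) 0)),
      List.nil_append,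
      flatMap_congr_mem (g := fun x => [PySem.List.pyGetD row x 0]) (fun x hx => by
        rw [List.mem_reverse] at hx
        have hb := PySem.List.mem_pyRange_one.mp hx
        rw [show max 0 (-x) = 0 from by omega,
          show min (0:Int) ((row.length : Int) - 1 - x) + 1 = 0 + 1 from by omega,
          PySem.List.pyRange_one_singleton]
        simp [PySem.List.pyGetD_zero_cons]),
      flatMap_singleton_eq_map]
    rw [show ((row.length : Int)) = PySem.List.len row from by simp [PySem.List.len_eq]]
    simp only [List.map_reverse, PySem.List.map_pyGetD_pyRange_zero]
  · rw [if_neg h1]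
    congr 1
    rw [outer_list_eq (arr.length : Int) ((arr.headD []).length : Int)]
    simp only [perDiag arr ((arr.length : Int)) (((arr.headD []).length : Int))]
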